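-- pv_equiv track=rewrite | github.com/princekjha-dev/Clipify | moments/filter.py | has_unclear_pronouns
-- ===== SOURCE A (Python) =====
-- def has_unclear_pronouns(text: str) -> bool:
--     """
--     Check for pronouns without clear antecedents in first sentence
--     """
--     first_sentence = text.split('.')[0] if '.' in text else text
--     words = first_sentence.lower().split()[:10]  # First 10 words
--
--     # Problematic pronouns
--     unclear_pronouns = ['this', 'that', 'it', 'they', 'them', 'these', 'those']
--
--     for pronoun in unclear_pronouns:
--         if pronoun in words:
--             # Check if there's a clear referent before it
--             pronoun_idx = words.index(pronoun)
--             if pronoun_idx < 3:  # Pronoun appears too early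
--                 return True
--
--     return False
-- ===== SOURCE B (Python) =====
-- def has_unclear_pronouns(text: str) -> bool:
--     """
--     Check for pronouns without clear antecedents in first sentence
--     """
--     first_sentence = text.split('.')[0] if '.' in text else text
--     words = first_sentence.lower().split()[:10]
--     unclear_pronouns = {'this', 'that', 'it', 'they', 'them', 'these', 'those'}
--     return any(w in unclear_pronouns for w in words[:3])
-- ===== Notes on version B (the rewrite author's own statement) =====
-- stated objective: simpler
-- what changed: Instead of scanning the pronoun list and re-searching the word list with .index for the first-occurrence position, B just tests each of the first three words directly against a pronoun set, so the .index scan disappears.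
import Mathlib
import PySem

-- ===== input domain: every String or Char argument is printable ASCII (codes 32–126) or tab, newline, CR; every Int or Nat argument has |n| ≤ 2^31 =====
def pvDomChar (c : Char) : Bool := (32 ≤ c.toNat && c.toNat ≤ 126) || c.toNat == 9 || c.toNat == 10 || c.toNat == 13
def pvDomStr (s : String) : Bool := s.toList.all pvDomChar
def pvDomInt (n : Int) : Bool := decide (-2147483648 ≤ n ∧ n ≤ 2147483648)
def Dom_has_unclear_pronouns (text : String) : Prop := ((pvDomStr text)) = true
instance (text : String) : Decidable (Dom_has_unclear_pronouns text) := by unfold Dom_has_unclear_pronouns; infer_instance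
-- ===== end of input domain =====

-- B replaces A's pronoun-list loop with .index lookups by a direct membership test on the first three words (simpler decomposition).


-- ===== PORT A =====
-- the for-loop over unclear_pronouns: first pronoun found in `words` at index < 3 returns True
def pronounLoop (words : List String) : List String → Bool
  | [] => false
  | p :: rest =>
    if words.contains p then
      -- words.index(p): p ∈ words, so index? is some; the default 0 of getD is unreachable
      match PySem.List.index? words p with
      | some i => if i < 3 then true else pronounLoop words rest
      | none => pronounLoop words rest
    else pronounLoop words rest

def has_unclear_pronouns (text : String) : Bool :=
  -- text.split('.')[0] if '.' in text else text; split on a nonempty sep is nonempty, so headD's default is unreachable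
  let first_sentence := if PySem.Str.isIn "." text then ((PySem.Str.split? text ".").getD []).headD "" else text
  let words := PySem.List.slice (PySem.Str.split₀ (PySem.Str.lower first_sentence)) none (some 10)
  pronounLoop words ["this", "that", "it", "they", "them", "these", "those"]

-- ===== PORT B =====
def has_unclear_pronouns_alt (text : String) : Bool :=
  let first_sentence := if PySem.Str.isIn "." text then ((PySem.Str.split? text ".").getD []).headD "" else text
  let words := PySem.List.slice (PySem.Str.split₀ (PySem.Str.lower first_sentence)) none (some 10)
  (PySem.List.slice words none (some 3)).any
    (fun w => ["this", "that", "it", "they", "them", "these", "those"].contains w)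

-- ===== PRECONDITION & SPEC =====
def Spec_has_unclear_pronouns (text : String) (out : Bool) : Prop := out = has_unclear_pronouns_alt text
instance (text : String) (out : Bool) : Decidable (Spec_has_unclear_pronouns text out) := by unfold Spec_has_unclear_pronouns; infer_instance

-- ===== CLAIM (what is proved, stated in full; the proofs are below) =====
def Claim_equal_has_unclear_pronouns : Prop := ∀ (text : String), Dom_has_unclear_pronouns text → Spec_has_unclear_pronouns text (has_unclear_pronouns text)

-- ===== LEMMAS AND PROOFS =====

-- the first occurrence of p in ws is at index < 3 exactly when p occurs among the first 3 words
lemma index_lt_three_iff {ws : List String} {p : String} {i : Nat}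
    (h : PySem.List.index? ws p = some i) : (i < 3) ↔ p ∈ ws.take 3 := by
  obtain ⟨hk, hget, hmin⟩ := PySem.List.getElem_of_index?_eq_some h
  constructor
  · intro hi
    exact List.mem_take_iff_getElem.mpr ⟨i, by omega, hget⟩
  · intro hp
    obtain ⟨j, hj, hjp⟩ := List.mem_take_iff_getElem.mp hp
    by_contra hi
    exact hmin j (by omega) hjp

lemma pronounLoop_eq_any (ws : List String) (P : List String) :
    pronounLoop ws P = P.any (fun p => decide (p ∈ ws.take 3)) := by
  induction P with
  | nil => rfl
  | cons p rest ih =>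
    simp only [pronounLoop, List.any_cons]
    by_cases hp : p ∈ ws
    · rw [if_pos (List.contains_iff_mem.mpr hp)]
      obtain ⟨i, hi⟩ := Option.isSome_iff_exists.mp ((PySem.List.index?_isSome_iff ws p).mpr hp)
      rw [hi]
      by_cases h3 : i < 3
      · simp [(index_lt_three_iff hi).mp h3, h3]
      · have : p ∉ ws.take 3 := fun hm => h3 ((index_lt_three_iff hi).mpr hm)
        simp [this, h3, ih]
    · rw [if_neg (by simp [hp])]
      have : p ∉ ws.take 3 := fun hm => hp (List.mem_of_mem_take hm)
      simp [this, ih]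

lemma any_mem_comm (ws P : List String) :
    (ws.take 3).any (fun w => P.contains w) = P.any (fun p => decide (p ∈ ws.take 3)) := by
  simp only [List.any_eq, List.contains_iff_mem, decide_eq_true_eq]
  congr 1
  apply propext
  constructor
  · rintro ⟨w, hw, hwP⟩; exact ⟨w, hwP, hw⟩
  · rintro ⟨p, hpP, hp⟩; exact ⟨p, hp, hpP⟩

-- ===== VERDICT (by name: the statement is the Claim_ definition above) =====
theorem has_unclear_pronouns_spec : Claim_equal_has_unclear_pronouns := by
  intro text _
  unfold Spec_has_unclear_pronouns has_unclear_pronouns has_unclear_pronouns_alt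
  simp only []  -- zeta-reduce the lets on both sides
  generalize PySem.List.slice (PySem.Str.split₀ (PySem.Str.lower _)) none (some 10) = ws
  rw [pronounLoop_eq_any, ← any_mem_comm]
  have h3 : PySem.List.slice ws none (some 3) = ws.take 3 :=
    PySem.List.slice_to_natCast (α := String) (xs := ws) (b := 3) ▸ rfl
  rw [h3]
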